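-- pv_equiv track=rewrite | github.com/walmis/VPforce-TelemFFB | utils.py | insert_dict_item
-- ===== SOURCE A (Python) =====
-- def insert_dict_item(original_dict, new_key, new_value, insert_key, before=True):
--     updated_dict = {}
--     found = False
--
--     for key, value in original_dict.items():
--         if key == insert_key and before:
--             updated_dict[new_key] = new_value
--             found = True
--         updated_dict[key] = value
--         if key == insert_key and not before:
--             updated_dict[new_key] = new_value
--             found = True
--
--     if not found:
--         # Key not found, append at the end (default behavior)
--         updated_dict[new_key] = new_value
--
--     return updated_dict
-- ===== SOURCE B (Python) =====
-- def insert_dict_item(original_dict, new_key, new_value, insert_key, before=True):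
--     items = list(original_dict.items())
--     keys = [k for k, _ in items]
--     if insert_key in keys:
--         pos = keys.index(insert_key) + (0 if before else 1)
--     else:
--         pos = len(items)
--     items.insert(pos, (new_key, new_value))
--     return dict(items)
-- ===== Notes on version B (the rewrite author's own statement) =====
-- stated objective: simpler
-- what changed: Replaces the stream-with-flag single pass over dict items by a find-the-insertion-index-then-list.insert-then-dict() decomposition.
import Mathlib
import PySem

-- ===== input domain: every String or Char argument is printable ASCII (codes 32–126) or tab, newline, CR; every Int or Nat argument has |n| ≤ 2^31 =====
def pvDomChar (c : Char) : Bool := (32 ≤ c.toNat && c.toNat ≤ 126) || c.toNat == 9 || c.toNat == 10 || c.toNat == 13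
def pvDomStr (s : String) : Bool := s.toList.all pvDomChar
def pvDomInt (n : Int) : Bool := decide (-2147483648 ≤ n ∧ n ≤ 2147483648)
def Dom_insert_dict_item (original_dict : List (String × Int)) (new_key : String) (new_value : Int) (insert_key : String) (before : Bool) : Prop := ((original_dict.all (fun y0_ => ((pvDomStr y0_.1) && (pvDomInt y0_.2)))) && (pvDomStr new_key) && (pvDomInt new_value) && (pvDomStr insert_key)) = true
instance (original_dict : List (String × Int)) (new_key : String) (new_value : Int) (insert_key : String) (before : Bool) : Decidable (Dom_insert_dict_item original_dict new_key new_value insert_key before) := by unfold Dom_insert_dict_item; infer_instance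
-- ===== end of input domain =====

-- B replaces A's stream-with-flag single pass by a find-the-insertion-index / list.insert / dict() decomposition (objective: simpler).

-- ===== PORT A =====
-- A's loop body: the per-item step of 'for key, value in original_dict.items()', on state (updated_dict, found)
def pvStepA (new_key : String) (new_value : Int) (insert_key : String) (before : Bool)
    (st : PySem.Dict String Int × Bool) (kv : String × Int) : PySem.Dict String Int × Bool :=
  let st1 := if kv.1 == insert_key && before then (st.1.insert new_key new_value, true) else st
  let st2 := (st1.1.insert kv.1 kv.2, st1.2)
  if kv.1 == insert_key && !before then (st2.1.insert new_key new_value, true) else st2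

def insert_dict_item (original_dict : List (String × Int)) (new_key : String) (new_value : Int) (insert_key : String) (before : Bool) : List (String × Int) :=
  -- 'if not found: updated_dict[new_key] = new_value' after the loop, then return updated_dict
  (if (original_dict.foldl (pvStepA new_key new_value insert_key before) (PySem.Dict.empty, false)).2
   then (original_dict.foldl (pvStepA new_key new_value insert_key before) (PySem.Dict.empty, false)).1
   else (original_dict.foldl (pvStepA new_key new_value insert_key before) (PySem.Dict.empty, false)).1.insert new_key new_value).items

-- ===== PORT B =====
-- items = list(...); keys = [k for k,_ in items]; pos = keys.index(insert_key) (+1 if after) or len(items);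
-- items.insert(pos, (new_key, new_value)); return dict(items)
def insert_dict_item_alt (original_dict : List (String × Int)) (new_key : String) (new_value : Int) (insert_key : String) (before : Bool) : List (String × Int) :=
  (PySem.Dict.ofList
    (PySem.List.insert original_dict
      (match PySem.List.index? (original_dict.map Prod.fst) insert_key with
       | some i => (i : Int) + (if before then 0 else 1)
       | none => (original_dict.length : Int))
      (new_key, new_value))).items

-- ===== PRECONDITION & SPEC =====
-- Pre_ requires the association list's keys to be distinct: it stands for a Python dict, whose keys are
-- unique by construction; duplicate-key lists represent no Python input of A at all.
def Pre_insert_dict_item (original_dict : List (String × Int)) (new_key : String) (new_value : Int) (insert_key : String) (before : Bool) : Prop :=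
  (original_dict.map Prod.fst).Nodup
instance (original_dict : List (String × Int)) (new_key : String) (new_value : Int) (insert_key : String) (before : Bool) : Decidable (Pre_insert_dict_item original_dict new_key new_value insert_key before) := by unfold Pre_insert_dict_item; infer_instance
def pvWitness_insert_dict_item : (List (String × Int)) × String × Int × String × Bool := ([("a", 1), ("b", 2)], "x", 7, "b", true)

def Spec_insert_dict_item (original_dict : List (String × Int)) (new_key : String) (new_value : Int) (insert_key : String) (before : Bool) (out : List (String × Int)) : Prop := out = insert_dict_item_alt original_dict new_key new_value insert_key before
instance (original_dict : List (String × Int)) (new_key : String) (new_value : Int) (insert_key : String) (before : Bool) (out : List (String × Int)) : Decidable (Spec_insert_dict_item original_dict new_key new_value insert_key before out) := by unfold Spec_insert_dict_item; infer_instance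

-- ===== CLAIM (what is proved, stated in full; the proofs are below) =====
def Claim_equal_insert_dict_item : Prop := ∀ (original_dict : List (String × Int)) (new_key : String) (new_value : Int) (insert_key : String) (before : Bool), Dom_insert_dict_item original_dict new_key new_value insert_key before → Pre_insert_dict_item original_dict new_key new_value insert_key before → Spec_insert_dict_item original_dict new_key new_value insert_key before (insert_dict_item original_dict new_key new_value insert_key before)

-- ===== LEMMAS AND PROOFS =====

-- the spliced item list B effectively folds over, written with take/drop to ease induction
def pvSplice (new_key : String) (new_value : Int) (insert_key : String) (before : Bool) (l : List (String × Int)) : List (String × Int) :=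
  match PySem.List.index? (l.map Prod.fst) insert_key with
  | some i => l.take (if before then i else i + 1) ++ (new_key, new_value) :: l.drop (if before then i else i + 1)
  | none => l ++ [(new_key, new_value)]

-- once insert_key can no longer appear, A's loop is a plain insert fold and the flag is unchanged
theorem pvStepA_notfound (new_key : String) (new_value : Int) (insert_key : String) (before : Bool)
    (l : List (String × Int)) (d : PySem.Dict String Int) (b : Bool)
    (h : insert_key ∉ l.map Prod.fst) :
    l.foldl (pvStepA new_key new_value insert_key before) (d, b)
      = (l.foldl (fun d kv => d.insert kv.1 kv.2) d, b) := by
  induction l generalizing d with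
  | nil => rfl
  | cons kv t ih =>
      simp only [List.map_cons, List.mem_cons, not_or] at h
      have hne : (kv.1 == insert_key) = false := beq_eq_false_iff_ne.mpr (fun e => h.1 e.symm)
      simp only [List.foldl_cons, pvStepA, hne, Bool.false_and, Bool.false_eq_true, if_false]
      exact ih _ h.2

-- A's whole computation, from any starting dict, is the insert fold over the spliced list
theorem pvA_eq_splice (new_key : String) (new_value : Int) (insert_key : String) (before : Bool)
    (l : List (String × Int)) (d : PySem.Dict String Int)
    (h : (l.map Prod.fst).Nodup) :
    (if (l.foldl (pvStepA new_key new_value insert_key before) (d, false)).2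
     then (l.foldl (pvStepA new_key new_value insert_key before) (d, false)).1
     else (l.foldl (pvStepA new_key new_value insert_key before) (d, false)).1.insert new_key new_value)
      = (pvSplice new_key new_value insert_key before l).foldl (fun d kv => d.insert kv.1 kv.2) d := by
  induction l generalizing d with
  | nil => simp [pvSplice, PySem.List.index?]
  | cons kv t ih =>
      obtain ⟨k, v⟩ := kv
      simp only [List.map_cons, List.nodup_cons] at h
      by_cases hk : k = insert_key
      · subst hk
        have hnt : k ∉ t.map Prod.fst := h.1
        simp only [pvSplice, List.map_cons, PySem.List.index?_cons_self]
        cases before with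
        | true =>
            simp only [List.foldl_cons, pvStepA, beq_self_eq_true, Bool.and_self,
              Bool.not_true, Bool.and_false, Bool.false_eq_true, if_false, if_true]
            rw [pvStepA_notfound _ _ _ _ _ _ _ hnt]
            simp
        | false =>
            simp only [List.foldl_cons, pvStepA, beq_self_eq_true, Bool.and_false, Bool.not_false,
              Bool.and_true, Bool.false_eq_true, if_false, if_true]
            rw [pvStepA_notfound _ _ _ _ _ _ _ hnt]
            simp
      · have hne : (k == insert_key) = false := beq_eq_false_iff_ne.mpr hk
        have hsp : pvSplice new_key new_value insert_key before ((k, v) :: t)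
            = (k, v) :: pvSplice new_key new_value insert_key before t := by
          simp only [pvSplice, List.map_cons]
          rw [PySem.List.index?_cons_of_ne _ hk]
          cases hidx : PySem.List.index? (t.map Prod.fst) insert_key with
          | none => simp
          | some i => cases before <;> simp
        rw [hsp]
        simp only [List.foldl_cons, pvStepA, hne, Bool.false_and, Bool.false_eq_true, if_false]
        exact ih _ h.2

-- B's insertion position produces exactly the spliced list
theorem pvB_items_eq_splice (new_key : String) (new_value : Int) (insert_key : String) (before : Bool)
    (l : List (String × Int)) :
    PySem.List.insert l
        (match PySem.List.index? (l.map Prod.fst) insert_key with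
         | some i => (i : Int) + (if before then 0 else 1)
         | none => (l.length : Int)) (new_key, new_value)
      = pvSplice new_key new_value insert_key before l := by
  rw [pvSplice]
  cases hidx : PySem.List.index? (l.map Prod.fst) insert_key with
  | none =>
      dsimp only
      rw [PySem.List.insert_natCast l l.length _ (le_refl _)]
      simp
  | some i =>
      have hi : i < l.length := by
        obtain ⟨pre, suf, hxs, hlen, -⟩ := (PySem.List.index?_eq_some_iff _ _ _).mp hidx
        have : (l.map Prod.fst).length = l.length := List.length_map ..
        rw [hxs] at this
        simp at this
        omega
      have hp : (if before then i else i + 1) ≤ l.length := by cases before <;> simp <;> omega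
      dsimp only
      have hcast : ((i : Int) + (if before then 0 else 1)) = (((if before then i else i + 1 : Nat)) : Int) := by
        cases before <;> simp
      rw [hcast, PySem.List.insert_natCast l _ _ hp]

-- ===== VERDICT (by name: the statement is the Claim_ definition above) =====
theorem insert_dict_item_spec : Claim_equal_insert_dict_item := by
  intro od nk nv ik bef _ hpre
  unfold Spec_insert_dict_item insert_dict_item insert_dict_item_alt
  rw [pvB_items_eq_splice, pvA_eq_splice nk nv ik bef od PySem.Dict.empty hpre]
  rfl
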